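-- pv_equiv track=rewrite | github.com/whisper0077/programming-contests | cheetah/7/HandShaking.py | countPerfect
-- ===== SOURCE A (Python) =====
-- def countPerfect(n):
--     dp = [0]*(n+1)
--     dp[0] = 1
--     dp[1] = 1
--     dp[2] = 1
--     for i in range(4, n+1, 2):
--         # 時計回りに1人飛ばしで偶数組を作っていく
--         for j in range(1, n+1, 2):
--             dp[i] += dp[j-1] * dp[i-(j-1)-2]
--     return dp[n]
-- ===== SOURCE B (Python) =====
-- def countPerfect(n):
--     # closed-form Catalan product: C(0)=1, C(k+1) = C(k)*2*(2k+1)//(k+2); answer is C(n//2) for even n, 0 for odd n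
--     if n % 2 == 1:
--         return 0
--     c = 1
--     for k in range(n // 2):
--         c = c * 2 * (2 * k + 1) // (k + 2)
--     return c
-- ===== Notes on version B (the rewrite author's own statement) =====
-- stated objective: faster
-- what changed: Replaced the O(n^2) convolution DP (with Python negative-index wraparound reads) by the O(n) closed-form Catalan product C(k+1)=C(k)*2*(2k+1)//(k+2), returning C(n/2) for even n and 0 for odd n.
-- outside the precondition, e.g. on countPerfect(0): A raises IndexError, B returns 1; on countPerfect(1): A raises IndexError, B returns 0
import Mathlib
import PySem

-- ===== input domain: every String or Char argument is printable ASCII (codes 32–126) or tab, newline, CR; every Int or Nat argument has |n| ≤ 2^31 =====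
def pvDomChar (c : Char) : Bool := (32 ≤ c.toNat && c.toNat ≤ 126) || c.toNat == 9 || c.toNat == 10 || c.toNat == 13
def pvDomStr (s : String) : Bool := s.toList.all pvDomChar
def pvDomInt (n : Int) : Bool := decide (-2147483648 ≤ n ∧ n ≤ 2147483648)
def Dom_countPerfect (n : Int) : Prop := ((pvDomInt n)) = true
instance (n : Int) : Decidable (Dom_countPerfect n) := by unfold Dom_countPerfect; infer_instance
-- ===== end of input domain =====

-- B replaces A's O(n^2) convolution DP by the O(n) Catalan product C(k+1)=C(k)*2*(2k+1)//(k+2): C(n/2) for even n, 0 for odd n.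

-- ===== PORT A =====
def countPerfect (n : Int) : Int :=
  let dp : List Int := (((List.replicate (n + 1).toNat (0 : Int)).set 0 1).set 1 1).set 2 1
  let dp := (PySem.List.pyRange 4 (n + 1) 2).foldl (fun dp i =>
      (PySem.List.pyRange 1 (n + 1) 2).foldl (fun dp j =>
        dp.set i.toNat (PySem.List.pyGetD dp i 0 +
          PySem.List.pyGetD dp (j - 1) 0 * PySem.List.pyGetD dp (i - (j - 1) - 2) 0)) dp) dp
  PySem.List.pyGetD dp n 0

-- ===== PORT B =====
def countPerfect_alt (n : Int) : Int :=
  if PySem.Int.mod n 2 = 1 then 0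
  else
    (PySem.List.pyRange 0 (PySem.Int.floordiv n 2)).foldl
      (fun c k => PySem.Int.floordiv (c * 2 * (2 * k + 1)) (k + 2)) 1

-- ===== PRECONDITION & SPEC =====
-- Pre_ excludes exactly n < 2, where A raises IndexError (the dp table [0]*(n+1) is too short for the seed writes dp[0..2]).
def Pre_countPerfect (n : Int) : Prop := 2 ≤ n
instance (n : Int) : Decidable (Pre_countPerfect n) := by unfold Pre_countPerfect; infer_instance
def pvWitness_countPerfect : Int := 6

def Spec_countPerfect (n : Int) (out : Int) : Prop := out = countPerfect_alt n
instance (n : Int) (out : Int) : Decidable (Spec_countPerfect n out) := by unfold Spec_countPerfect; infer_instance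

-- ===== CLAIM (what is proved, stated in full; the proofs are below) =====
def Claim_equal_countPerfect : Prop := ∀ (n : Int), Dom_countPerfect n → Pre_countPerfect n → Spec_countPerfect n (countPerfect n)

-- ===== LEMMAS AND PROOFS =====

lemma catalan_step (k : Nat) : (k + 2) * catalan (k + 1) = 2 * (2 * k + 1) * catalan k := by
  apply Nat.eq_of_mul_eq_mul_left (show 0 < k + 1 by omega)
  calc (k + 1) * ((k + 2) * catalan (k + 1)) = (k + 1) * (k + 1).centralBinom := by
        rw [succ_mul_catalan_eq_centralBinom (k + 1)]
    _ = 2 * (2 * k + 1) * k.centralBinom := Nat.succ_mul_centralBinom_succ k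
    _ = 2 * (2 * k + 1) * ((k + 1) * catalan k) := by rw [succ_mul_catalan_eq_centralBinom k]
    _ = (k + 1) * (2 * (2 * k + 1) * catalan k) := by ring

lemma floordiv_catalan (k : Nat) :
    PySem.Int.floordiv ((catalan k : Int) * 2 * (2 * (k : Int) + 1)) ((k : Int) + 2) = (catalan (k + 1) : Int) := by
  have h1 : ((catalan k : Int) * 2 * (2 * (k : Int) + 1)) = ((catalan k * 2 * (2 * k + 1) : Nat) : Int) := by
    push_cast; ring
  have h2 : ((k : Int) + 2) = ((k + 2 : Nat) : Int) := by push_cast; ring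
  rw [h1, h2, PySem.Int.floordiv_natCast]
  have h3 : catalan k * 2 * (2 * k + 1) = (k + 2) * catalan (k + 1) := by
    rw [catalan_step]; ring
  rw [h3, Nat.mul_div_cancel_left _ (by omega)]

lemma foldB (m : Nat) :
    (PySem.List.pyRange 0 (m : Int)).foldl
      (fun c k => PySem.Int.floordiv (c * 2 * (2 * k + 1)) (k + 2)) 1 = (catalan m : Int) := by
  rw [PySem.List.pyRange_zero_natCast, List.foldl_map]
  induction m with
  | zero => simp [catalan_zero]
  | succ k ih =>
      rw [List.range_succ, List.foldl_append, ih]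
      simpa using floordiv_catalan k

lemma alt_even (m : Nat) : countPerfect_alt ((2 * m : Nat) : Int) = (catalan m : Int) := by
  simp only [countPerfect_alt]
  have hmod : PySem.Int.mod ((2 * m : Nat) : Int) 2 = 0 := by
    rw [PySem.Int.mod_eq_emod_of_pos (by norm_num : (0:Int) < 2)]; omega
  have hdiv : PySem.Int.floordiv ((2 * m : Nat) : Int) 2 = (m : Int) := by
    rw [PySem.Int.floordiv_eq_ediv_of_pos (by norm_num : (0:Int) < 2)]; omega
  rw [hmod, hdiv]
  simpa using foldB m

lemma alt_odd (n : Int) (h : n % 2 = 1) : countPerfect_alt n = 0 := by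
  simp only [countPerfect_alt]
  rw [PySem.Int.mod_eq_emod_of_pos (by norm_num : (0:Int) < 2), if_pos h]


def entE (u idx : Nat) : Int :=
  if idx % 2 = 1 then (if idx = 1 then 1 else 0)
  else if idx / 2 ≤ u then (catalan (idx / 2) : Int) else 0

def dpM (m u : Nat) : List Int := (List.range (2 * m + 1)).map (entE u)

lemma length_dpM (m u : Nat) : (dpM m u).length = 2 * m + 1 := by simp [dpM]

lemma pyGetD_dpM (m u : Nat) (q : Int) (h0 : 0 ≤ q) (h1 : q ≤ 2 * m) :
    PySem.List.pyGetD (dpM m u) q 0 = entE u q.toNat := by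
  rw [PySem.List.pyGetD_of_nonneg _ _ h0, dpM]
  exact PySem.List.getD_map_range _ _ _ _ (by omega)

lemma pyGetD_dpM_neg (m u : Nat) (q : Int) (h0 : q < 0) (h1 : -(2 * (m : Int) + 1) ≤ q) :
    PySem.List.pyGetD (dpM m u) q 0 = entE u (2 * m + 1 - (-q).toNat) := by
  have hlen : (dpM m u).length = 2 * m + 1 := by simp [dpM]
  have hidx : PySem.List.pyIdx? (dpM m u).length q = some (2 * m + 1 - (-q).toNat) := by
    rw [hlen]; simp only [PySem.List.pyIdx?]
    rw [if_neg (by omega), if_pos (by push_cast; omega)]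
  rw [PySem.List.pyGetD, PySem.List.pyGet?, hidx]
  have hlt : 2 * m + 1 - (-q).toNat < 2 * m + 1 := by omega
  simp [dpM, List.getElem?_map, List.getElem?_range hlt]

lemma pyGetD_set_ne (l : List Int) (p : Nat) (v : Int) (q : Int)
    (h : PySem.List.pyIdx? l.length q ≠ some p) :
    PySem.List.pyGetD (l.set p v) q 0 = PySem.List.pyGetD l q 0 := by
  rw [PySem.List.pyGetD, PySem.List.pyGetD, PySem.List.pyGet?, PySem.List.pyGet?, List.length_set]
  cases hi : PySem.List.pyIdx? l.length q with
  | none => simp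
  | some k =>
      have hk : k ≠ p := by rintro rfl; exact h hi
      simp [List.getElem?_set_ne (Ne.symm hk)]

lemma pyGetD_set_self (l : List Int) (p : Nat) (v : Int) (hp : p < l.length) :
    PySem.List.pyGetD (l.set p v) (p : Int) 0 = v := by
  rw [PySem.List.pyGetD, PySem.List.pyGet?, List.length_set]
  have : PySem.List.pyIdx? l.length (p : Int) = some p := by
    simp [PySem.List.pyIdx?, by exact_mod_cast hp]
  rw [this]
  simp [hp]

lemma pyIdx?_pos (n : Nat) (q : Int) (h0 : 0 ≤ q) (h1 : q < n) :
    PySem.List.pyIdx? n q = some q.toNat := by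
  simp only [PySem.List.pyIdx?]; rw [if_pos h0, if_pos (by omega)]

lemma pyIdx?_neg (n : Nat) (q : Int) (h0 : q < 0) (h1 : -(n:Int) ≤ q) :
    PySem.List.pyIdx? n q = some (n - (-q).toNat) := by
  simp only [PySem.List.pyIdx?]; rw [if_neg (by omega), if_pos (by omega)]

def gval (m t k : Nat) : Int :=
  PySem.List.pyGetD (dpM m (t - 1)) ((2 * k : Nat) : Int) 0 *
    PySem.List.pyGetD (dpM m (t - 1)) (2 * (t : Int) - ((2 * k : Nat) : Int) - 2) 0

lemma accum (m t : Nat) (h2 : 2 ≤ t) (htm : t ≤ m) (ks : List Nat) (hks : ∀ k ∈ ks, k < m) (s : Int) :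
    ks.foldl (fun dp (k : Nat) =>
        dp.set (2 * (t : Int)).toNat (PySem.List.pyGetD dp (2 * (t : Int)) 0 +
          PySem.List.pyGetD dp ((1 + 2 * (k : Int)) - 1) 0 *
            PySem.List.pyGetD dp (2 * (t : Int) - ((1 + 2 * (k : Int)) - 1) - 2) 0))
      ((dpM m (t - 1)).set (2 * t) s)
    = (dpM m (t - 1)).set (2 * t) (s + (ks.map (gval m t)).sum) := by
  induction ks generalizing s with
  | nil => simp
  | cons k ks ih =>
      have hkm : k < m := hks k List.mem_cons_self
      have hlen : (dpM m (t - 1)).length = 2 * m + 1 := length_dpM m (t - 1)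
      have h2t : (2 * (t : Int)).toNat = 2 * t := by omega
      have hcast : (2 * (t : Int)) = ((2 * t : Nat) : Int) := by push_cast; ring
      have e2 : 2 * (t : Int) - ((1 + 2 * (k : Int)) - 1) - 2
          = 2 * (t : Int) - ((2 * k : Nat) : Int) - 2 := by push_cast; ring
      have e1 : (1 + 2 * (k : Int)) - 1 = ((2 * k : Nat) : Int) := by push_cast; ring
      have hR0 : PySem.List.pyGetD ((dpM m (t - 1)).set (2 * t) s) (2 * (t : Int)) 0 = s := by
        rw [hcast]; exact pyGetD_set_self _ _ _ (by omega)
      have hstep : ((dpM m (t - 1)).set (2 * t) s).set (2 * (t : Int)).toNat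
            (PySem.List.pyGetD ((dpM m (t - 1)).set (2 * t) s) (2 * (t : Int)) 0 +
              PySem.List.pyGetD ((dpM m (t - 1)).set (2 * t) s) ((1 + 2 * (k : Int)) - 1) 0 *
                PySem.List.pyGetD ((dpM m (t - 1)).set (2 * t) s) (2 * (t : Int) - ((1 + 2 * (k : Int)) - 1) - 2) 0)
          = (dpM m (t - 1)).set (2 * t) (s + gval m t k) := by
        rw [h2t, List.set_set, hR0, e2, e1]
        by_cases hk : k = t
        · -- j-1 = i : the first factor reads the accumulating cell, the second factor is 0 on both sides
          subst hk
          have hr1 : PySem.List.pyGetD ((dpM m (k - 1)).set (2 * k) s) ((2 * k : Nat) : Int) 0 = s :=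
            pyGetD_set_self _ _ _ (by omega)
          have hneg : 2 * (k : Int) - ((2 * k : Nat) : Int) - 2 = -2 := by push_cast; ring
          have hz : PySem.List.pyGetD (dpM m (k - 1)) (-2) 0 = 0 := by
            rw [pyGetD_dpM_neg _ _ _ (by norm_num) (by omega)]
            norm_num
            simp only [entE]; rw [if_pos (by omega), if_neg (by omega)]
          have hr2 : PySem.List.pyGetD ((dpM m (k - 1)).set (2 * k) s) (2 * (k : Int) - ((2 * k : Nat) : Int) - 2) 0 = 0 := by
            rw [hneg]
            rw [pyGetD_set_ne _ _ _ _ (by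
              rw [hlen, pyIdx?_neg _ _ (by norm_num) (by push_cast; omega)]
              intro hsome
              have : 2 * m + 1 - ((2:Int)).toNat = 2 * k := Option.some_injective _ hsome
              omega)]
            exact hz
          have hg : gval m k k = 0 := by
            unfold gval
            rw [hneg, hz, mul_zero]
          rw [hr1, hr2, hg]
          congr 1
          ring
        · -- neither read touches position 2*t
          have hr1 : PySem.List.pyGetD ((dpM m (t - 1)).set (2 * t) s) ((2 * k : Nat) : Int) 0
              = PySem.List.pyGetD (dpM m (t - 1)) ((2 * k : Nat) : Int) 0 := by
            apply pyGetD_set_ne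
            rw [hlen, pyIdx?_pos _ _ (by positivity) (by push_cast; omega)]
            intro hsome
            have : ((2 * k : Nat) : Int).toNat = 2 * t := Option.some_injective _ hsome
            omega
          have hr2 : PySem.List.pyGetD ((dpM m (t - 1)).set (2 * t) s) (2 * (t : Int) - ((2 * k : Nat) : Int) - 2) 0
              = PySem.List.pyGetD (dpM m (t - 1)) (2 * (t : Int) - ((2 * k : Nat) : Int) - 2) 0 := by
            apply pyGetD_set_ne
            by_cases hkt : k < t
            · rw [hlen, pyIdx?_pos _ _ (by push_cast; omega) (by push_cast; omega)]
              intro hsome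
              have : (2 * (t : Int) - ((2 * k : Nat) : Int) - 2).toNat = 2 * t := Option.some_injective _ hsome
              omega
            · rw [hlen, pyIdx?_neg _ _ (by push_cast; omega) (by push_cast; omega)]
              intro hsome
              have : 2 * m + 1 - (-(2 * (t : Int) - ((2 * k : Nat) : Int) - 2)).toNat = 2 * t :=
                Option.some_injective _ hsome
              omega
          rw [hr1, hr2]
          rfl
      rw [List.foldl_cons, hstep, ih (fun k2 hk2 => hks k2 (List.mem_cons_of_mem _ hk2))]
      rw [List.map_cons, List.sum_cons]
      congr 1
      ring

lemma sum_map_range_int (m : Nat) (f : Nat → Int) :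
    ((List.range m).map f).sum = ∑ i ∈ Finset.range m, f i := by
  induction m with
  | zero => simp
  | succ k ih => rw [List.range_succ, List.map_append, List.sum_append, Finset.sum_range_succ, ih]; simp

lemma entE_even (u j : Nat) : entE u (2 * j) = if j ≤ u then (catalan j : Int) else 0 := by
  simp only [entE]
  rw [if_neg (by omega)]
  have h : 2 * j / 2 = j := by omega
  rw [h]

lemma gval_eval (m t k : Nat) (h2 : 2 ≤ t) (htm : t ≤ m) (hkm : k < m) :
    gval m t k = if k < t then (catalan k : Int) * (catalan (t - 1 - k) : Int) else 0 := by
  unfold gval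
  have hf1 : PySem.List.pyGetD (dpM m (t - 1)) ((2 * k : Nat) : Int) 0 = entE (t - 1) (2 * k) := by
    rw [pyGetD_dpM _ _ _ (by positivity) (by push_cast; omega)]
    congr 1
  rw [hf1, entE_even]
  by_cases hkt : k < t
  · have hf2 : PySem.List.pyGetD (dpM m (t - 1)) (2 * (t : Int) - ((2 * k : Nat) : Int) - 2) 0
        = entE (t - 1) (2 * (t - 1 - k)) := by
      rw [pyGetD_dpM _ _ _ (by push_cast; omega) (by push_cast; omega)]
      congr 1
      push_cast
      omega
    rw [hf2, entE_even, if_pos (by omega), if_pos (by omega), if_pos hkt]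
  · rw [if_neg (by omega), zero_mul, if_neg hkt]

lemma gval_sum (m t : Nat) (h2 : 2 ≤ t) (htm : t ≤ m) :
    ((List.range m).map (gval m t)).sum = (catalan t : Int) := by
  rw [sum_map_range_int]
  have hcongr : ∑ k ∈ Finset.range m, gval m t k
      = ∑ k ∈ Finset.range m, (if k < t then (catalan k : Int) * (catalan (t - 1 - k) : Int) else 0) := by
    apply Finset.sum_congr rfl
    intro k hk
    exact gval_eval m t k h2 htm (Finset.mem_range.mp hk)
  rw [hcongr]
  have hsub : Finset.range t ⊆ Finset.range m := by intro x hx; rw [Finset.mem_range] at *; omega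
  rw [← Finset.sum_subset hsub
      (by intro x _ hx; rw [if_neg (by simpa [Finset.mem_range] using hx)])]
  have hsum : ∑ k ∈ Finset.range t, (if k < t then (catalan k : Int) * (catalan (t - 1 - k) : Int) else 0)
      = ∑ k ∈ Finset.range t, (catalan k : Int) * (catalan (t - 1 - k) : Int) := by
    apply Finset.sum_congr rfl
    intro k hk
    rw [if_pos (Finset.mem_range.mp hk)]
  rw [hsum]
  have hc : catalan t = ∑ k ∈ Finset.range t, catalan k * catalan (t - 1 - k) := by
    have h := catalan_succ (t - 1)
    rw [Fin.sum_univ_eq_sum_range (fun i => catalan i * catalan (t - 1 - i)) (t - 1 + 1)] at h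
    have ht1 : t - 1 + 1 = t := by omega
    rw [ht1] at h
    exact h
  rw [hc]
  push_cast
  rfl

lemma inner_lemma (m t : Nat) (h2 : 2 ≤ t) (htm : t ≤ m) :
    (PySem.List.pyRange 1 (2 * (m : Int) + 1) 2).foldl (fun dp j =>
        dp.set (2 * (t : Int)).toNat (PySem.List.pyGetD dp (2 * (t : Int)) 0 +
          PySem.List.pyGetD dp (j - 1) 0 *
            PySem.List.pyGetD dp (2 * (t : Int) - (j - 1) - 2) 0))
      (dpM m (t - 1)) = dpM m t := by
  have hrange : PySem.List.pyRange 1 (2 * (m : Int) + 1) 2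
      = (List.range m).map (fun (k : Nat) => (1 : Int) + 2 * (k : Int)) := by
    have hcnt : ((2 * (m : Int) + 1 - 1 + 2 - 1) / 2).toNat = m := by omega
    rw [PySem.List.pyRange_of_pos _ _ (by norm_num), if_pos (by omega), hcnt]
  rw [hrange, List.foldl_map]
  have hlen : 2 * t < (dpM m (t - 1)).length := by rw [length_dpM]; omega
  have hval : (dpM m (t - 1))[2 * t]'hlen = 0 := by
    simp only [dpM, List.getElem_map, List.getElem_range, entE_even]
    rw [if_neg (by omega)]
  conv_lhs => rw [← List.set_getElem_self hlen, hval]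
  rw [accum m t h2 htm (List.range m) (fun k hk => List.mem_range.mp hk) 0]
  rw [gval_sum m t h2 htm, zero_add]
  apply List.ext_getElem (by simp [dpM])
  intro i hi1 hi2
  simp only [List.getElem_set, dpM, List.getElem_map, List.getElem_range]
  by_cases hit : 2 * t = i
  · rw [if_pos hit, ← hit]
    rw [entE_even, if_pos le_rfl]
  · rw [if_neg hit]
    simp only [entE]
    split_ifs <;> first | rfl | omega

lemma init_eq (m : Nat) :
    (((List.replicate (2 * m + 1) (0 : Int)).set 0 1).set 1 1).set 2 1 = dpM m 1 := by
  apply List.ext_getElem (by simp [dpM])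
  intro i hi1 hi2
  simp only [List.getElem_set, List.getElem_replicate, dpM, List.getElem_map, List.getElem_range]
  by_cases h0 : i = 0
  · subst h0; norm_num [entE, catalan_zero]
  · by_cases h1 : i = 1
    · subst h1; norm_num [entE]
    · by_cases hh2 : i = 2
      · subst hh2; norm_num [entE, catalan_one]
      · rw [if_neg (by omega), if_neg (by omega), if_neg (by omega)]
        simp only [entE]
        split_ifs <;> first | rfl | omega

lemma outer_lemma (m : Nat) : ∀ t : Nat, 1 ≤ t → t ≤ m →
    (PySem.List.pyRange 4 (2 * (t : Int) + 1) 2).foldl (fun dp i =>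
        (PySem.List.pyRange 1 (2 * (m : Int) + 1) 2).foldl (fun dp j =>
          dp.set i.toNat (PySem.List.pyGetD dp i 0 +
            PySem.List.pyGetD dp (j - 1) 0 * PySem.List.pyGetD dp (i - (j - 1) - 2) 0)) dp)
      (dpM m 1) = dpM m t := by
  intro t
  induction t with
  | zero => intro h1 _; exact absurd h1 (by omega)
  | succ t ih =>
      intro _ h2
      by_cases ht : t = 0
      · subst ht
        have hr : PySem.List.pyRange 4 (2 * ((1 : Nat) : Int) + 1) 2 = [] := by
          rw [PySem.List.pyRange_of_pos _ _ (by norm_num), if_neg (by norm_num)]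
          simp
        rw [hr]
        rfl
      · have ht1 : 1 ≤ t := by omega
        have hL : PySem.List.pyRange 4 (2 * ((t + 1 : Nat) : Int) + 1) 2
            = (List.range t).map (fun (k : Nat) => (4 : Int) + 2 * (k : Int)) := by
          have hcnt : ((2 * ((t + 1 : Nat) : Int) + 1 - 4 + 2 - 1) / 2).toNat = t := by
            push_cast; omega
          rw [PySem.List.pyRange_of_pos _ _ (by norm_num), if_pos (by push_cast; omega), hcnt]
        have hR : PySem.List.pyRange 4 (2 * (t : Int) + 1) 2
            = (List.range (t - 1)).map (fun (k : Nat) => (4 : Int) + 2 * (k : Int)) := by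
          by_cases h2t : 2 ≤ t
          · have hcnt : ((2 * (t : Int) + 1 - 4 + 2 - 1) / 2).toNat = t - 1 := by omega
            rw [PySem.List.pyRange_of_pos _ _ (by norm_num), if_pos (by omega), hcnt]
          · have he : t = 1 := by omega
            subst he
            rw [PySem.List.pyRange_of_pos _ _ (by norm_num), if_neg (by norm_num)]
        have hsplit : List.range t = List.range (t - 1) ++ [t - 1] := by
          rw [← List.range_succ]
          congr 1
          omega
        rw [hL, hsplit, List.map_append, List.foldl_append, ← hR, ih ht1 (by omega)]
        simp only [List.map_cons, List.map_nil, List.foldl_cons, List.foldl_nil]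
        have hi : (4 : Int) + 2 * ((t - 1 : Nat) : Int) = 2 * ((t + 1 : Nat) : Int) := by
          push_cast
          omega
        rw [hi]
        have h := inner_lemma m (t + 1) (by omega) (by omega)
        simpa using h

lemma even_case (m : Nat) (hm : 1 ≤ m) : countPerfect ((2 * m : Nat) : Int) = (catalan m : Int) := by
  simp only [countPerfect]
  have e0 : (((2 * m : Nat) : Int) + 1).toNat = 2 * m + 1 := by omega
  have e1 : ((2 * m : Nat) : Int) + 1 = 2 * (m : Int) + 1 := by push_cast; ring
  rw [e0, init_eq m, e1, outer_lemma m m hm le_rfl]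
  rw [pyGetD_dpM _ _ _ (by positivity) (by push_cast; omega)]
  have e2 : ((2 * m : Nat) : Int).toNat = 2 * m := by omega
  rw [e2, entE_even, if_pos le_rfl]

lemma fold_set_getD (p k : Nat) (hk : p ≠ k) (g : List Int → Int → Int) (js : List Int) :
    ∀ l : List Int, (js.foldl (fun dp j => dp.set p (g dp j)) l).getD k 0 = l.getD k 0 := by
  induction js with
  | nil => intro l; rfl
  | cons j js ih =>
      intro l
      rw [List.foldl_cons, ih]
      simp [List.getD, List.getElem?_set_ne hk]

lemma outer_pres (k : Nat) (b : Int) (xs : List Int) (hxs : ∀ i ∈ xs, i.toNat ≠ k) :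
    ∀ l : List Int, (xs.foldl (fun dp i =>
      (PySem.List.pyRange 1 b 2).foldl (fun dp j =>
        dp.set i.toNat (PySem.List.pyGetD dp i 0 +
          PySem.List.pyGetD dp (j - 1) 0 * PySem.List.pyGetD dp (i - (j - 1) - 2) 0)) dp) l).getD k 0
      = l.getD k 0 := by
  induction xs with
  | nil => intro l; rfl
  | cons i xs ih =>
      intro l
      rw [List.foldl_cons, ih (fun i2 h2 => hxs i2 (List.mem_cons_of_mem _ h2))]
      exact fold_set_getD i.toNat k (hxs i List.mem_cons_self) _ _ l

lemma odd_case (n : Int) (h3 : 3 ≤ n) (hodd : n % 2 = 1) : countPerfect n = 0 := by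
  simp only [countPerfect]
  rw [PySem.List.pyGetD_of_nonneg _ _ (by omega)]
  rw [outer_pres n.toNat (n + 1) _ (by
    intro i hi
    have h := (PySem.List.mem_pyRange_iff_of_pos (by norm_num) i).mp hi
    omega)]
  have g2 : (2 : Nat) ≠ n.toNat := by omega
  have g1 : (1 : Nat) ≠ n.toNat := by omega
  have g0 : (0 : Nat) ≠ n.toNat := by omega
  simp [List.getD, List.getElem?_set_ne g2, List.getElem?_set_ne g1, List.getElem?_set_ne g0,
    List.getElem?_replicate]
  split <;> rfl

-- ===== VERDICT (by name: the statement is the Claim_ definition above) =====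
theorem countPerfect_spec : Claim_equal_countPerfect := by
  intro n _ hpre
  unfold Pre_countPerfect at hpre
  unfold Spec_countPerfect
  rcases Int.emod_two_eq n with h | h
  · have hm : 1 ≤ n.toNat / 2 := by omega
    have hn : n = ((2 * (n.toNat / 2) : Nat) : Int) := by push_cast; omega
    rw [hn, even_case _ hm, alt_even]
  · have h3 : 3 ≤ n := by omega
    rw [odd_case n h3 h, alt_odd n h]
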